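-- pv_equiv track=rewrite | github.com/bl4ckf0xk/Python-Projects | Count_Words_In_Website_Using_Arg.py | count_occ_in
-- ===== SOURCE A (Python) =====
-- def count_occ_in(word_list,min_lenght):
--     word_count = {}
--
--     for word in word_list:
--         if len(word) < min_lenght:
--             continue
--         if word not in word_count:
--             word_count[word] = 1
--
--         else:
--             curr_count = word_count.get(word)
--             word_count[word] = curr_count + 1
--     return word_count
-- ===== SOURCE B (Python) =====
-- def count_occ_in(word_list, min_lenght):
--     # two-pass: filter once, then build the result from the deduplicated
--     # kept words, counting each word's occurrences in the filtered list
--     kept = [w for w in word_list if len(w) >= min_lenght]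
--     return {w: kept.count(w) for w in dict.fromkeys(kept)}
-- ===== Notes on version B (the rewrite author's own statement) =====
-- stated objective: alternative
-- what changed: Replaces A's single-pass incremental dict-update loop by a filter pass followed by a dedup-and-count comprehension (each distinct kept word paired with kept.count(w)); no per-word membership-test/increment state is maintained.
import Mathlib
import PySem

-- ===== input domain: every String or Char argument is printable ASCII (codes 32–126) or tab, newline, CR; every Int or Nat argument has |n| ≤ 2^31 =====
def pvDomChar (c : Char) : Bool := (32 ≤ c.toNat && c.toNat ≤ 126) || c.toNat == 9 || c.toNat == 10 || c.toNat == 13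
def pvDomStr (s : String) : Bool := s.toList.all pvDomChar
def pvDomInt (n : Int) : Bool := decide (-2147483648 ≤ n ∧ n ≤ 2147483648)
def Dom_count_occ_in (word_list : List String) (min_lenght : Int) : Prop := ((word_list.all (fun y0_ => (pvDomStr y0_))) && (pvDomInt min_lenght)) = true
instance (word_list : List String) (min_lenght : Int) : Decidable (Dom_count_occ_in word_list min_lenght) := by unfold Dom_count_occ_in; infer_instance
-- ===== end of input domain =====

-- B rebuilds the dict as filter → dedup → per-word count instead of A's incremental update loop (alternative decomposition, not faster).

-- ===== PORT A =====
-- A's loop: skip short words; insert 1 on first sight, else overwrite with current count + 1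
-- ('word_count.get(word)' is 'some'-valued in that branch, so getD 0 is exact there).
def count_occ_in (word_list : List String) (min_lenght : Int) : List (String × Int) :=
  (word_list.foldl (fun d w =>
      if PySem.Str.len w < min_lenght then d
      else if d.contains w = false then d.insert w 1
      else d.insert w (d.getD w 0 + 1))
    (PySem.Dict.empty : PySem.Dict String Int)).items

-- ===== PORT B =====
def count_occ_in_alt (word_list : List String) (min_lenght : Int) : List (String × Int) :=
  let kept := word_list.filter (fun w => decide (min_lenght ≤ PySem.Str.len w))
  (PySem.List.dedup kept).map (fun w => (w, (kept.count w : Int)))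

-- ===== PRECONDITION & SPEC =====
def Spec_count_occ_in (word_list : List String) (min_lenght : Int) (out : List (String × Int)) : Prop := out = count_occ_in_alt word_list min_lenght
instance (word_list : List String) (min_lenght : Int) (out : List (String × Int)) : Decidable (Spec_count_occ_in word_list min_lenght out) := by unfold Spec_count_occ_in; infer_instance

-- ===== CLAIM (what is proved, stated in full; the proofs are below) =====
def Claim_equal_count_occ_in : Prop := ∀ (word_list : List String) (min_lenght : Int), Dom_count_occ_in word_list min_lenght → Spec_count_occ_in word_list min_lenght (count_occ_in word_list min_lenght)

-- ===== LEMMAS AND PROOFS =====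

-- A's loop body always overwrites with getD + 1 (on a fresh key getD is 0, so insert 1 = insert (0+1)).
theorem count_occ_in_body_eq (min_lenght : Int) :
    (fun (d : PySem.Dict String Int) w =>
      if PySem.Str.len w < min_lenght then d
      else if d.contains w = false then d.insert w 1
      else d.insert w (d.getD w 0 + 1))
    = (fun d w =>
      if min_lenght ≤ PySem.Str.len w then d.insert w (d.getD w 0 + 1) else d) := by
  funext d w
  by_cases h1 : PySem.Str.len w < min_lenght
  · rw [if_pos h1, if_neg (show ¬ min_lenght ≤ PySem.Str.len w by omega)]
  · by_cases h2 : d.contains w = false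
    · rw [if_neg h1, if_pos h2, if_pos (by omega), PySem.Dict.getD_of_not_contains d 0 h2]
      norm_num
    · rw [if_neg h1, if_neg h2, if_pos (by omega)]

-- ===== VERDICT (by name: the statement is the Claim_ definition above) =====
theorem count_occ_in_spec : Claim_equal_count_occ_in := by
  intro word_list min_lenght _
  unfold Spec_count_occ_in count_occ_in count_occ_in_alt
  rw [count_occ_in_body_eq]
  have h := PySem.List.foldl_ite_eq_foldl_filter (fun w => min_lenght ≤ PySem.Str.len w)
      (fun (d : PySem.Dict String Int) w => d.insert w (d.getD w 0 + 1)) word_list PySem.Dict.empty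
  rw [h, PySem.Dict.foldl_insert_getD_add_one_eq_counter, PySem.Dict.items_counter]
  simp [PySem.List.dedup_eq_ofList]
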